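-- pv_equiv track=rewrite | github.com/rjmurillo/ai-agents | scripts/traceability/show_traceability_graph.py | get_connected_ids
-- ===== SOURCE A (Python) =====
-- from typing import Any
--
-- def get_connected_ids(
--     graph: dict[str, Any],
--     root_id: str,
--     direction: str,
--     max_depth: int,
--     current_depth: int = 0,
--     visited: set[str] | None = None,
-- ) -> list[str]:
--     """Traverse the graph in a given direction ('forward' or 'backward').
--
--     Returns all reachable node IDs up to max_depth (0 = unlimited).
--     """
--     if visited is None:
--         visited = set()
--     if root_id in visited:
--         return []
--     visited.add(root_id)
--
--     result = [root_id]
--     if max_depth != 0 and current_depth >= max_depth: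
--         return result
--
--     ref_key = "forward_refs" if direction == "forward" else "backward_refs"
--     for neighbor in graph[ref_key].get(root_id, []):
--         result.extend(
--             get_connected_ids(graph, neighbor, direction, max_depth, current_depth + 1, visited)
--         )
--     return result
-- ===== SOURCE B (Python) =====
-- def get_connected_ids(
--     graph,
--     root_id,
--     direction,
--     max_depth,
--     current_depth=0,
--     visited=None,
-- ):
--     """Iterative DFS with an explicit (node, depth) stack; same pre-order as the recursion."""
--     if visited is None:
--         visited = set()
--     ref_key = "forward_refs" if direction == "forward" else "backward_refs"
--     result = []
--     stack = [(root_id, current_depth)]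
--     while stack:
--         node, depth = stack.pop()
--         if node in visited:
--             continue
--         visited.add(node)
--         result.append(node)
--         if max_depth == 0 or depth < max_depth:
--             for neighbor in reversed(graph[ref_key].get(node, [])):
--                 stack.append((neighbor, depth + 1))
--     return result
-- ===== Notes on version B (the rewrite author's own statement) =====
-- stated objective: alternative
-- what changed: The recursive pre-order DFS is rewritten as an iterative loop over an explicit (node, depth) stack: neighbors are pushed in reverse order and nodes are marked visited at pop time, reproducing the exact emission order and visited/depth-limit interaction without recursion (and without Python's recursion-depth limit on deep graphs).
import Mathlib
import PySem

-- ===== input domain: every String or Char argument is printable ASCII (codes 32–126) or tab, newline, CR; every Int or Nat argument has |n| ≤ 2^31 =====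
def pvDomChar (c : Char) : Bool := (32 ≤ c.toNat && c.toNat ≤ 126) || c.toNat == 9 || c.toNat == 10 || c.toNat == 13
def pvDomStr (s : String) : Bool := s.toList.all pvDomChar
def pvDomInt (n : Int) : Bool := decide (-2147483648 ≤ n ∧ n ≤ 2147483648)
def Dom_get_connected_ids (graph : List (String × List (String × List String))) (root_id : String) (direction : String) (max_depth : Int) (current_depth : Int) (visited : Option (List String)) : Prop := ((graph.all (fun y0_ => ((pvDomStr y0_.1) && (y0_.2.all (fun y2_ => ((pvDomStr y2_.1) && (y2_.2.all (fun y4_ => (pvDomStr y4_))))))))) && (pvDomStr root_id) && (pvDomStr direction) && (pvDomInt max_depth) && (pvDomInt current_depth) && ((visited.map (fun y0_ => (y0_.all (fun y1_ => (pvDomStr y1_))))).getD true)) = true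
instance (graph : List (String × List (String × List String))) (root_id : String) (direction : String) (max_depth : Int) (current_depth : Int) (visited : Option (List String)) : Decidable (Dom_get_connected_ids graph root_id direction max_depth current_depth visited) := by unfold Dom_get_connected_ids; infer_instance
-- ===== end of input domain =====

-- B is the same pre-order DFS written iteratively with an explicit (node, depth) stack instead of
-- recursion (objective: alternative decomposition; return-value equivalence — both Pythons mutate
-- the passed-in `visited` set in the same way).

-- ===== PORT A =====
-- graph[ref_key] of A (the adjacency dict for the chosen direction); [] stands for the missing-key
-- case, which Pre_ excludes (Python raises KeyError there whenever it is reached).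
def pvRefs (graph : List (String × List (String × List String))) (direction : String) : List (String × List String) :=
  ((PySem.Dict.mk graph).get? (if direction == "forward" then "forward_refs" else "backward_refs")).getD []

-- recursive DFS of A; the Nat argument is a fuel guard making the recursion total (the wrapper
-- passes enough fuel: each nested call marks a fresh adjacency key as visited)
def dfsA (graph : List (String × List (String × List String))) (direction : String) (max_depth : Int) :
    Nat → String → Int → PySem.Set String → (List String × PySem.Set String)
  | 0, _, _, vis => ([], vis)
  | fuel+1, root_id, d, vis =>
    if PySem.Set.contains vis root_id then ([], vis)
    else
      let vis1 := PySem.Set.add vis root_id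
      if max_depth ≠ 0 ∧ d ≥ max_depth then ([root_id], vis1)
      else
        (PySem.Dict.getD (PySem.Dict.mk (pvRefs graph direction)) root_id []).foldl
          (fun acc nb =>
            let r := dfsA graph direction max_depth fuel nb (d+1) acc.2
            (acc.1 ++ r.1, r.2))
          ([root_id], vis1)

def get_connected_ids (graph : List (String × List (String × List String))) (root_id : String) (direction : String) (max_depth : Int) (current_depth : Int) (visited : Option (List String)) : List String :=
  (dfsA graph direction max_depth ((pvRefs graph direction).length + 1) root_id current_depth
    (PySem.Set.ofList (visited.getD []))).1

-- ===== PORT B =====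
-- number of adjacency keys not yet visited: the termination measure of B's loop
def pvMeasure (graph : List (String × List (String × List String))) (direction : String) (vis : PySem.Set String) : Nat :=
  ((pvRefs graph direction).filter (fun kv => !PySem.Set.contains vis kv.1)).length

theorem pvMeasure_add_le (graph : List (String × List (String × List String))) (direction : String)
    (vis : PySem.Set String) (x : String) :
    pvMeasure graph direction (PySem.Set.add vis x) ≤ pvMeasure graph direction vis := by
  apply List.Sublist.length_le
  apply List.monotone_filter_right
  intro a ha
  simp only [Bool.not_eq_true', ← Bool.not_eq_true] at ha ⊢
  intro hc
  rw [PySem.Set.contains_iff] at hc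
  exact ha (by rw [PySem.Set.contains_iff]; exact (PySem.Set.mem_add vis x a.1).mpr (Or.inl hc))

theorem pvMeasure_add_lt (graph : List (String × List (String × List String))) (direction : String)
    (vis : PySem.Set String) (x : String) (hx : ¬ PySem.Set.contains vis x = true)
    (hk : x ∈ (pvRefs graph direction).map (fun kv => kv.1)) :
    pvMeasure graph direction (PySem.Set.add vis x) < pvMeasure graph direction vis := by
  have himp : ∀ a : String × List String,
      (!PySem.Set.contains (PySem.Set.add vis x) a.1) = true → (!PySem.Set.contains vis a.1) = true := by
    intro a ha
    simp only [Bool.not_eq_true', ← Bool.not_eq_true] at ha ⊢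
    intro hc
    rw [PySem.Set.contains_iff] at hc
    exact ha (by rw [PySem.Set.contains_iff]; exact (PySem.Set.mem_add vis x a.1).mpr (Or.inl hc))
  have hsub := List.monotone_filter_right (pvRefs graph direction) himp
  rcases List.mem_map.mp hk with ⟨kv, hkv, hfst⟩
  apply Nat.lt_of_le_of_ne hsub.length_le
  intro hlen
  have heq := hsub.eq_of_length hlen
  have hq : kv ∈ (pvRefs graph direction).filter (fun kv => !PySem.Set.contains vis kv.1) := by
    refine List.mem_filter.mpr ⟨hkv, ?_⟩
    simp only [Bool.not_eq_true', ← Bool.not_eq_true]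
    rw [hfst, PySem.Set.contains_iff]
    intro hm
    exact hx (by rw [PySem.Set.contains_iff]; exact hm)
  rw [← heq] at hq
  have hbad := (List.mem_filter.mp hq).2
  have hmem : PySem.Set.contains (PySem.Set.add vis x) kv.1 = true := by
    rw [PySem.Set.contains_iff, hfst]
    exact (PySem.Set.mem_add vis x x).mpr (Or.inr rfl)
  rw [hmem] at hbad
  simp at hbad

theorem pvKey_of_getD_ne_nil (refs : List (String × List String)) (node : String)
    (h : PySem.Dict.getD (PySem.Dict.mk refs) node [] ≠ []) : node ∈ refs.map (fun kv => kv.1) := by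
  by_cases hc : (PySem.Dict.mk refs).contains node = true
  · have hm := (PySem.Dict.contains_iff_mem_keys _ _).mp hc
    simpa [PySem.Dict.keys_mk] using hm
  · exact absurd (PySem.Dict.getD_of_not_contains _ _ (eq_false_of_ne_true hc)) h

-- iterative DFS of B: stack of (node, depth) pairs, head of the list = top of the stack; pushing
-- the neighbours in reversed order onto the end-growing Python stack = prepending them in order here
def loopB (graph : List (String × List (String × List String))) (direction : String) (max_depth : Int) :
    List (String × Int) → PySem.Set String → List String → List String
  | [], _, result => result
  | (node, depth) :: rest, vis, result =>
    if h : PySem.Set.contains vis node then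
      loopB graph direction max_depth rest vis result
    else
      let vis1 := PySem.Set.add vis node
      let result1 := result ++ [node]
      if max_depth = 0 ∨ depth < max_depth then
        loopB graph direction max_depth
          (((PySem.Dict.getD (PySem.Dict.mk (pvRefs graph direction)) node []).map (fun s => (s, depth+1))) ++ rest)
          vis1 result1
      else
        loopB graph direction max_depth rest vis1 result1
termination_by stack vis _ => (pvMeasure graph direction vis, stack.length)
decreasing_by
  · exact Prod.Lex.right _ (by simp)
  · by_cases hn : PySem.Dict.getD (PySem.Dict.mk (pvRefs graph direction)) node [] = []
    · rcases Nat.lt_or_eq_of_le (pvMeasure_add_le graph direction vis node) with hlt | heq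
      · exact Prod.Lex.left _ _ hlt
      · rw [heq]; exact Prod.Lex.right _ (by simp [hn])
    · exact Prod.Lex.left _ _ (pvMeasure_add_lt graph direction vis node h (pvKey_of_getD_ne_nil _ _ hn))
  · rcases Nat.lt_or_eq_of_le (pvMeasure_add_le graph direction vis node) with hlt | heq
    · exact Prod.Lex.left _ _ hlt
    · rw [heq]; exact Prod.Lex.right _ (by simp)

def get_connected_ids_alt (graph : List (String × List (String × List String))) (root_id : String) (direction : String) (max_depth : Int) (current_depth : Int) (visited : Option (List String)) : List String :=
  loopB graph direction max_depth [(root_id, current_depth)] (PySem.Set.ofList (visited.getD [])) []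

-- ===== PRECONDITION & SPEC =====
-- Pre_ excludes exactly the inputs where Python A raises KeyError: the chosen ref key is missing
-- from graph and neither early return (already-visited root, depth limit already reached) fires.
def Pre_get_connected_ids (graph : List (String × List (String × List String))) (root_id : String) (direction : String) (max_depth : Int) (current_depth : Int) (visited : Option (List String)) : Prop :=
  root_id ∈ visited.getD [] ∨ (max_depth ≠ 0 ∧ max_depth ≤ current_depth) ∨
    (if direction == "forward" then "forward_refs" else "backward_refs") ∈ graph.map Prod.fst
instance (graph : List (String × List (String × List String))) (root_id : String) (direction : String) (max_depth : Int) (current_depth : Int) (visited : Option (List String)) : Decidable (Pre_get_connected_ids graph root_id direction max_depth current_depth visited) := by unfold Pre_get_connected_ids; infer_instance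

def pvWitness_get_connected_ids : (List (String × List (String × List String))) × String × String × Int × Int × Option (List String) :=
  ([("forward_refs", [("a", ["b", "c"]), ("b", ["c"])]), ("backward_refs", [])], "a", "forward", 0, 0, none)

def Spec_get_connected_ids (graph : List (String × List (String × List String))) (root_id : String) (direction : String) (max_depth : Int) (current_depth : Int) (visited : Option (List String)) (out : List String) : Prop := out = get_connected_ids_alt graph root_id direction max_depth current_depth visited
instance (graph : List (String × List (String × List String))) (root_id : String) (direction : String) (max_depth : Int) (current_depth : Int) (visited : Option (List String)) (out : List String) : Decidable (Spec_get_connected_ids graph root_id direction max_depth current_depth visited out) := by unfold Spec_get_connected_ids; infer_instance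

-- ===== CLAIM (what is proved, stated in full; the proofs are below) =====
def Claim_equal_get_connected_ids : Prop := ∀ (graph : List (String × List (String × List String))) (root_id : String) (direction : String) (max_depth : Int) (current_depth : Int) (visited : Option (List String)), Dom_get_connected_ids graph root_id direction max_depth current_depth visited → Pre_get_connected_ids graph root_id direction max_depth current_depth visited → Spec_get_connected_ids graph root_id direction max_depth current_depth visited (get_connected_ids graph root_id direction max_depth current_depth visited)

-- ===== LEMMAS AND PROOFS =====

theorem dfsA_mem (graph : List (String × List (String × List String))) (direction : String) (max_depth : Int) :
    ∀ (fuel : Nat) (node : String) (d : Int) (vis : PySem.Set String) (x : String), x ∈ vis →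
      x ∈ (dfsA graph direction max_depth fuel node d vis).2 := by
  intro fuel
  induction fuel with
  | zero => intro node d vis x hx; simpa [dfsA] using hx
  | succ f ih =>
    intro node d vis x hx
    rw [dfsA]
    cases hcon : PySem.Set.contains vis node with
    | true => simpa using hx
    | false =>
      have hx1 : x ∈ PySem.Set.add vis node := (PySem.Set.mem_add _ _ _).mpr (Or.inl hx)
      by_cases hdep : max_depth ≠ 0 ∧ d ≥ max_depth
      · simpa [hdep] using hx1
      · simp only [if_neg hdep]
        have aux : ∀ (ns : List String) (acc : List String × PySem.Set String), x ∈ acc.2 →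
            x ∈ (ns.foldl (fun acc nb =>
              let r := dfsA graph direction max_depth f nb (d+1) acc.2
              (acc.1 ++ r.1, r.2)) acc).2 := by
          intro ns
          induction ns with
          | nil => intro acc h; simpa using h
          | cons n tl iht =>
            intro acc h
            simp only [List.foldl_cons]
            exact iht _ (ih n (d+1) acc.2 x h)
        exact aux _ _ hx1

theorem pvMeasure_le_of_subset (graph : List (String × List (String × List String))) (direction : String)
    (vis vis' : PySem.Set String) (h : ∀ x, x ∈ vis → x ∈ vis') :
    pvMeasure graph direction vis' ≤ pvMeasure graph direction vis := by
  apply List.Sublist.length_le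
  apply List.monotone_filter_right
  intro a ha
  simp only [Bool.not_eq_true', ← Bool.not_eq_true] at ha ⊢
  intro hc
  rw [PySem.Set.contains_iff] at hc
  exact ha (by rw [PySem.Set.contains_iff]; exact h _ hc)

theorem pvMeasure_dfsA_le (graph : List (String × List (String × List String))) (direction : String) (max_depth : Int)
    (fuel : Nat) (node : String) (d : Int) (vis : PySem.Set String) :
    pvMeasure graph direction (dfsA graph direction max_depth fuel node d vis).2 ≤ pvMeasure graph direction vis :=
  pvMeasure_le_of_subset graph direction vis _ (fun x hx => dfsA_mem graph direction max_depth fuel node d vis x hx)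

-- the fold of A's for-loop shifted by its initial result accumulator
theorem dfsA_fold_shift (graph : List (String × List (String × List String))) (direction : String) (max_depth : Int)
    (fuel : Nat) (d : Int) :
    ∀ (ns : List String) (a : List String) (v : PySem.Set String),
      ns.foldl (fun acc nb =>
          let r := dfsA graph direction max_depth fuel nb (d+1) acc.2
          (acc.1 ++ r.1, r.2)) (a, v)
      = (a ++ (ns.foldl (fun acc nb =>
          let r := dfsA graph direction max_depth fuel nb (d+1) acc.2
          (acc.1 ++ r.1, r.2)) ([], v)).1,
         (ns.foldl (fun acc nb =>
          let r := dfsA graph direction max_depth fuel nb (d+1) acc.2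
          (acc.1 ++ r.1, r.2)) ([], v)).2) := by
  intro ns
  induction ns with
  | nil => intro a v; simp
  | cons n tl ih =>
    intro a v
    simp only [List.foldl_cons, List.nil_append]
    rw [ih ((a, v).1 ++ (dfsA graph direction max_depth fuel n (d+1) (a, v).2).1) _,
        ih (dfsA graph direction max_depth fuel n (d+1) v).1 _]
    simp [List.append_assoc]

theorem loopB_dfsA (graph : List (String × List (String × List String))) (direction : String) (max_depth : Int) :
    ∀ (fuel : Nat) (node : String) (d : Int) (vis : PySem.Set String) (rest : List (String × Int)) (result : List String),
      pvMeasure graph direction vis < fuel →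
      loopB graph direction max_depth ((node, d) :: rest) vis result
        = loopB graph direction max_depth rest (dfsA graph direction max_depth fuel node d vis).2
            (result ++ (dfsA graph direction max_depth fuel node d vis).1) := by
  intro fuel
  induction fuel with
  | zero => intro node d vis rest result h; exact absurd h (Nat.not_lt_zero _)
  | succ f ih =>
    intro node d vis rest result hfuel
    rw [dfsA, loopB]
    cases hcon : PySem.Set.contains vis node with
    | true => simp
    | false =>
      simp only [Bool.false_eq_true, ↓reduceDIte]
      by_cases hdep : max_depth ≠ 0 ∧ d ≥ max_depth
      · have hB : ¬ (max_depth = 0 ∨ d < max_depth) := by omega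
        simp [hdep]
      · have hB : max_depth = 0 ∨ d < max_depth := by omega
        simp only [if_neg hdep, if_pos hB]
        by_cases hnil : PySem.Dict.getD (PySem.Dict.mk (pvRefs graph direction)) node [] = []
        · simp [hnil]
        · -- the root is an unvisited adjacency key: the measure drops below f
          have hlt : pvMeasure graph direction (PySem.Set.add vis node) < f :=
            Nat.lt_of_lt_of_le
              (pvMeasure_add_lt graph direction vis node (by simpa using hcon) (pvKey_of_getD_ne_nil _ _ hnil))
              (Nat.lt_succ_iff.mp hfuel)
          have E2 : ∀ (ns : List String) (vis' : PySem.Set String) (rest : List (String × Int)) (result : List String),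
              pvMeasure graph direction vis' < f →
              loopB graph direction max_depth ((ns.map (fun s => (s, d+1))) ++ rest) vis' result
                = loopB graph direction max_depth rest
                    (ns.foldl (fun acc nb =>
                      let r := dfsA graph direction max_depth f nb (d+1) acc.2
                      (acc.1 ++ r.1, r.2)) ([], vis')).2
                    (result ++ (ns.foldl (fun acc nb =>
                      let r := dfsA graph direction max_depth f nb (d+1) acc.2
                      (acc.1 ++ r.1, r.2)) ([], vis')).1) := by
            intro ns
            induction ns with
            | nil => intro vis' rest result _; simp
            | cons n tl iht =>
              intro vis' rest result hv
              simp only [List.map_cons, List.cons_append, List.foldl_cons, List.nil_append]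
              rw [ih n (d+1) vis' _ _ hv]
              rw [dfsA_fold_shift graph direction max_depth f d tl
                    (dfsA graph direction max_depth f n (d+1) vis').1
                    (dfsA graph direction max_depth f n (d+1) vis').2]
              rw [iht _ _ _ (Nat.lt_of_le_of_lt (pvMeasure_dfsA_le graph direction max_depth f n (d+1) vis') hv)]
              simp [List.append_assoc]
          rw [E2 _ _ _ _ hlt]
          rw [dfsA_fold_shift graph direction max_depth f d _ [node] (PySem.Set.add vis node)]
          simp [List.append_assoc]

-- ===== VERDICT (by name: the statement is the Claim_ definition above) =====
theorem get_connected_ids_spec : Claim_equal_get_connected_ids := by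
  intro graph root_id direction max_depth current_depth visited _ _
  unfold Spec_get_connected_ids get_connected_ids get_connected_ids_alt
  rw [loopB_dfsA graph direction max_depth ((pvRefs graph direction).length + 1) root_id current_depth
      (PySem.Set.ofList (visited.getD [])) [] [] (Nat.lt_succ_of_le (List.length_filter_le _ _))]
  simp [loopB]
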